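-- pv_equiv track=rewrite | github.com/Roman1i/pythonLesson3 | 5.py | negafibonacci_list
-- ===== SOURCE A (Python) =====
-- def fibonacci_number(a):
--     if a == 0:
--         return 0
--     elif a == 1:
--         return 1
--     else:
--         return fibonacci_number(a - 1) + fibonacci_number(a - 2)
--
-- def negafibonacci_list(a):
--     lst = []
--     for i in range(a):
--         if (a - i) % 2 == 0:
--             lst.append(-fibonacci_number(a - i))
--         else:
--             lst.append(fibonacci_number(a - i))
--     lst.append(0)
--     for i in range(a):
--         lst.append(fibonacci_number(i + 1))
--     return lst
-- ===== SOURCE B (Python) =====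
-- def negafibonacci_list(a):
--     fibs = []
--     x, y = 0, 1
--     for _ in range(a):
--         fibs.append(y)
--         x, y = y, x + y
--     neg = [-v if k % 2 == 0 else v for k, v in zip(range(a, 0, -1), reversed(fibs))]
--     return neg + [0] + fibs
-- ===== Notes on version B (the rewrite author's own statement) =====
-- stated objective: faster
-- what changed: replaces the naive exponential-time recursive fibonacci_number calls (one per list element) with a single iterative two-variable Fibonacci pass whose results are reused for both halves of the list
import Mathlib
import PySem

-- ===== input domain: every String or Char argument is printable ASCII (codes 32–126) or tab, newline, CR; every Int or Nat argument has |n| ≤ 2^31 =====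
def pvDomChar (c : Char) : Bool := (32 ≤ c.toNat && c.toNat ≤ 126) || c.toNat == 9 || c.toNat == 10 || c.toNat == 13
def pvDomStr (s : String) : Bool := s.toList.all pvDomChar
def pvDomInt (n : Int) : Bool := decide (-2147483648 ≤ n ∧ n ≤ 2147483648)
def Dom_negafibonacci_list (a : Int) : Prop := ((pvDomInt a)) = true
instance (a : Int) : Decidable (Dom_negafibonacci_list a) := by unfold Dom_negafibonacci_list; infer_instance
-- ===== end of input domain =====

-- B replaces A's exponential recursive fibonacci_number (re-run for every element) by one
-- iterative O(a) Fibonacci pass reused for both halves of the list (objective: faster).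

-- ===== PORT A =====
-- A's recursive fibonacci_number; recursion on the Nat magnitude (Python diverges for
-- negative arguments, which A never produces, so toNat-totalisation is faithful where called).
def fibonacci_number_nat : Nat → Int
  | 0 => 0
  | 1 => 1
  | n + 2 => fibonacci_number_nat (n + 1) + fibonacci_number_nat n

def fibonacci_number (a : Int) : Int := fibonacci_number_nat a.toNat

def negafibonacci_list (a : Int) : List Int :=
  let lst : List Int := (PySem.List.pyRange 0 a 1).foldl
    (fun lst i =>
      if PySem.Int.mod (a - i) 2 == 0 then lst ++ [-(fibonacci_number (a - i))]
      else lst ++ [fibonacci_number (a - i)]) []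
  let lst := lst ++ [0]
  (PySem.List.pyRange 0 a 1).foldl (fun lst i => lst ++ [fibonacci_number (i + 1)]) lst

-- ===== PORT B =====
def negafibonacci_list_alt (a : Int) : List Int :=
  let s := (List.range a.toNat).foldl
    (fun (s : List Int × Int × Int) _ => (s.1 ++ [s.2.2], s.2.2, s.2.1 + s.2.2)) ([], 0, 1)
  let fibs := s.1
  let neg := ((PySem.List.pyRange a 0 (-1)).zip fibs.reverse).map
    (fun kv => if PySem.Int.mod kv.1 2 == 0 then -kv.2 else kv.2)
  neg ++ [0] ++ fibs

-- ===== PRECONDITION & SPEC =====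
-- A's fibonacci_number recurses to depth a, so CPython raises RecursionError once a reaches the
-- interpreter recursion limit (default ~1000); Pre_ keeps a safely below that. (For negative a
-- both loops are empty and A returns [0], so no lower bound is needed.)
def Pre_negafibonacci_list (a : Int) : Prop := a ≤ 900
instance (a : Int) : Decidable (Pre_negafibonacci_list a) := by unfold Pre_negafibonacci_list; infer_instance
def pvWitness_negafibonacci_list : Int := (5)

def Spec_negafibonacci_list (a : Int) (out : List Int) : Prop := out = negafibonacci_list_alt a
instance (a : Int) (out : List Int) : Decidable (Spec_negafibonacci_list a out) := by unfold Spec_negafibonacci_list; infer_instance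

-- ===== CLAIM (what is proved, stated in full; the proofs are below) =====
def Claim_equal_negafibonacci_list : Prop := ∀ (a : Int), Dom_negafibonacci_list a → Pre_negafibonacci_list a → Spec_negafibonacci_list a (negafibonacci_list a)

-- ===== LEMMAS AND PROOFS =====

-- invariant of B's iterative Fibonacci loop
theorem fibs_loop_inv (n : Nat) :
    (List.range n).foldl
      (fun (s : List Int × Int × Int) _ => (s.1 ++ [s.2.2], s.2.2, s.2.1 + s.2.2)) ([], 0, 1)
    = ((List.range n).map (fun i => fibonacci_number_nat (i + 1)),
       fibonacci_number_nat n, fibonacci_number_nat (n + 1)) := by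
  induction n with
  | zero => simp [fibonacci_number_nat]
  | succ m ih =>
      rw [List.range_succ, List.foldl_append, ih]
      simp [fibonacci_number_nat, Int.add_comm]

theorem reverse_map_range {α : Type} (n : Nat) (f : Nat → α) :
    ((List.range n).map f).reverse = (List.range n).map (fun k => f (n - 1 - k)) := by
  induction n with
  | zero => simp
  | succ m ih =>
      conv_lhs => rw [List.range_succ]
      rw [List.map_append, List.reverse_append]
      simp only [List.map_cons, List.map_nil, List.reverse_cons, List.reverse_nil,
        List.nil_append, List.cons_append, ih]
      conv_rhs => rw [List.range_succ_eq_map]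
      simp only [List.map_cons, List.map_map]
      congr 1
      apply List.map_congr_left
      intro k _
      simp only [Function.comp_apply]
      congr 1
      omega

theorem A_eq (a : Int) :
    negafibonacci_list a =
      (List.range a.toNat).map (fun (k : Nat) =>
        if PySem.Int.mod (a - (k : Int)) 2 == 0
        then -(fibonacci_number_nat (a.toNat - k)) else fibonacci_number_nat (a.toNat - k))
      ++ [0] ++ (List.range a.toNat).map (fun k => fibonacci_number_nat (k + 1)) := by
  unfold negafibonacci_list
  have hstep : ∀ (l : List Int) (i : Int),
      (if PySem.Int.mod (a - i) 2 == 0 then l ++ [-(fibonacci_number (a - i))]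
       else l ++ [fibonacci_number (a - i)])
      = l ++ [if PySem.Int.mod (a - i) 2 == 0 then -(fibonacci_number (a - i))
              else fibonacci_number (a - i)] := by
    intro l i; split <;> rfl
  simp only [hstep, PySem.List.foldl_append_singleton_eq_map, List.nil_append]
  rw [PySem.List.pyRange_one 0 a]
  simp only [sub_zero, zero_add, List.map_map]
  congr 1
  · congr 1
    apply List.map_congr_left
    intro k hk
    rw [List.mem_range] at hk
    have h1 : (a - (k : Int)).toNat = a.toNat - k := by omega
    simp [fibonacci_number, h1]

theorem B_eq (a : Int) :
    negafibonacci_list_alt a =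
      (List.range a.toNat).map (fun (k : Nat) =>
        if PySem.Int.mod (a - (k : Int)) 2 == 0
        then -(fibonacci_number_nat (a.toNat - k)) else fibonacci_number_nat (a.toNat - k))
      ++ [0] ++ (List.range a.toNat).map (fun k => fibonacci_number_nat (k + 1)) := by
  unfold negafibonacci_list_alt
  simp only [fibs_loop_inv]
  congr 1
  congr 1
  rcases le_or_gt a 0 with ha | ha
  · have h0 : a.toNat = 0 := by omega
    have hnil : PySem.List.pyRange a 0 (-1) = [] := PySem.List.pyRange_neg_one_eq_nil ha
    simp [h0, hnil]
  · have hcast : a = (a.toNat : Int) := by omega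
    rw [reverse_map_range, PySem.List.pyRange_neg_one a 0, sub_zero]
    rw [hcast, Int.toNat_natCast, List.zip_map', List.map_map]
    apply List.map_congr_left
    intro k hk
    rw [List.mem_range] at hk
    have h1 : ((a.toNat : Int) - (k : Int)) = ((a.toNat - k : Nat) : Int) := by omega
    have h2 : a.toNat - 1 - k + 1 = a.toNat - k := by omega
    simp [Function.comp, h2]

-- ===== VERDICT (by name: the statement is the Claim_ definition above) =====
theorem negafibonacci_list_spec : Claim_equal_negafibonacci_list := by
  intro a _ _
  unfold Spec_negafibonacci_list
  rw [A_eq, B_eq]
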